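-- pv_equiv track=rewrite | github.com/timowhite88/Farnsworth | farnsworth/agents/swarm_orchestrator.py | _infer_agent_type_from_thought
-- ===== SOURCE A (Python) =====
-- from typing import Any, Optional, Callable, List, Dict
--
-- def _infer_agent_type_from_thought(content: str, thought_type: str) -> Optional[str]:
--     """Infer what agent type might be useful for a thought."""
--     content_lower = content.lower()
--
--     if thought_type == "connection":
--         return "reasoning"
--     elif thought_type == "question":
--         if any(kw in content_lower for kw in ["code", "implement", "function"]):
--             return "code"
--         elif any(kw in content_lower for kw in ["research", "find", "search"]):
--             return "research"
--         return "reasoning"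
--     elif thought_type == "insight":
--         return "reasoning"
--     elif thought_type == "idea":
--         if any(kw in content_lower for kw in ["creative", "design", "write"]):
--             return "creative"
--         return "general"
--
--     return None
-- ===== SOURCE B (Python) =====
-- # Table-driven re-implementation: one rules dict scanned with a generic loop.
-- _RULES = {
--     "connection": ("reasoning", []),
--     "question": ("reasoning", [(("code", "implement", "function"), "code"),
--                                (("research", "find", "search"), "research")]),
--     "insight": ("reasoning", []),
--     "idea": ("general", [(("creative", "design", "write"), "creative")]),
-- }
--
-- def _infer_agent_type_from_thought(content: str, thought_type: str):
--     rule = _RULES.get(thought_type)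
--     if rule is None:
--         return None
--     default, table = rule
--     content_lower = content.lower()
--     for kws, result in table:
--         if any(kw in content_lower for kw in kws):
--             return result
--     return default
-- ===== Notes on version B (the rewrite author's own statement) =====
-- stated objective: simpler
-- what changed: Replaced the if/elif branch tree by a module-level rules table (thought_type -> (default, keyword rules)) scanned by one generic loop.
import Mathlib
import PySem

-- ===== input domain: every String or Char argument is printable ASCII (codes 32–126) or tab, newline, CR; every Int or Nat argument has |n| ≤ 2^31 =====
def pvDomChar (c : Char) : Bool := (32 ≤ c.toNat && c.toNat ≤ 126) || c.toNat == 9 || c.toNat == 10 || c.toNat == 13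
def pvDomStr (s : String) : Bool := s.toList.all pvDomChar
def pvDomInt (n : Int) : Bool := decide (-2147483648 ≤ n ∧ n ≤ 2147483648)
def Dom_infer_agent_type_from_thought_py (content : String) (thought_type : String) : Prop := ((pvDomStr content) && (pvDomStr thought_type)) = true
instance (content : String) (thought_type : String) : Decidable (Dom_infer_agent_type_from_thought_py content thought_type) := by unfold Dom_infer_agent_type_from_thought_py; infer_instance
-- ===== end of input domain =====

-- B replaces A's if/elif branch tree by one rules table scanned with a generic loop (objective: simpler).

-- ===== PORT A =====
def infer_agent_type_from_thought_py (content : String) (thought_type : String) : Option String :=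
  let content_lower := PySem.Str.lower content
  if thought_type == "connection" then some "reasoning"
  else if thought_type == "question" then
    if ["code", "implement", "function"].any (fun kw => PySem.Str.isIn kw content_lower) then some "code"
    else if ["research", "find", "search"].any (fun kw => PySem.Str.isIn kw content_lower) then some "research"
    else some "reasoning"
  else if thought_type == "insight" then some "reasoning"
  else if thought_type == "idea" then
    if ["creative", "design", "write"].any (fun kw => PySem.Str.isIn kw content_lower) then some "creative"
    else some "general"
  else none

-- ===== PORT B =====
-- the module-level rules table: thought_type -> (default, [(keywords, result)])
def pvRules : PySem.Dict String (String × List (List String × String)) :=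
  PySem.Dict.ofList
    [ ("connection", ("reasoning", [])),
      ("question", ("reasoning", [(["code", "implement", "function"], "code"),
                                  (["research", "find", "search"], "research")])),
      ("insight", ("reasoning", [])),
      ("idea", ("general", [(["creative", "design", "write"], "creative")])) ]

-- the generic table scan: first rule with a keyword in content_lower wins, else the default
def pvScan (content_lower : String) : List (List String × String) → String → String
  | [], dflt => dflt
  | (kws, result) :: rest, dflt =>
      if kws.any (fun kw => PySem.Str.isIn kw content_lower) then result
      else pvScan content_lower rest dflt

def infer_agent_type_from_thought_py_alt (content : String) (thought_type : String) : Option String :=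
  match pvRules.get? thought_type with
  | none => none
  | some (dflt, table) => some (pvScan (PySem.Str.lower content) table dflt)

-- ===== PRECONDITION & SPEC =====
def Spec_infer_agent_type_from_thought_py (content : String) (thought_type : String) (out : Option String) : Prop := out = infer_agent_type_from_thought_py_alt content thought_type
instance (content : String) (thought_type : String) (out : Option String) : Decidable (Spec_infer_agent_type_from_thought_py content thought_type out) := by unfold Spec_infer_agent_type_from_thought_py; infer_instance

-- ===== CLAIM (what is proved, stated in full; the proofs are below) =====
def Claim_equal_infer_agent_type_from_thought_py : Prop := ∀ (content : String) (thought_type : String), Dom_infer_agent_type_from_thought_py content thought_type → Spec_infer_agent_type_from_thought_py content thought_type (infer_agent_type_from_thought_py content thought_type)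

-- ===== LEMMAS AND PROOFS =====

-- ===== VERDICT (by name: the statement is the Claim_ definition above) =====
-- pvRules looked up at each of its four keys, and its key list
theorem pvRules_connection : pvRules.get? "connection" = some ("reasoning", []) := by decide
theorem pvRules_question : pvRules.get? "question" = some ("reasoning", [(["code", "implement", "function"], "code"), (["research", "find", "search"], "research")]) := by decide
theorem pvRules_insight : pvRules.get? "insight" = some ("reasoning", []) := by decide
theorem pvRules_idea : pvRules.get? "idea" = some ("general", [(["creative", "design", "write"], "creative")]) := by decide
theorem pvRules_keys : pvRules.keys = ["connection", "question", "insight", "idea"] := by decide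

theorem infer_agent_type_from_thought_py_spec : Claim_equal_infer_agent_type_from_thought_py := by
  intro content thought_type _
  unfold Spec_infer_agent_type_from_thought_py infer_agent_type_from_thought_py
    infer_agent_type_from_thought_py_alt
  by_cases h1 : thought_type = "connection"
  · subst h1; rw [pvRules_connection]; simp [pvScan]
  · by_cases h2 : thought_type = "question"
    · subst h2; rw [pvRules_question]; simp only [pvScan, List.any_cons, List.any_nil]; split_ifs <;> simp_all
    · by_cases h3 : thought_type = "insight"
      · subst h3; rw [pvRules_insight]; simp [pvScan]
      · by_cases h4 : thought_type = "idea"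
        · subst h4; rw [pvRules_idea]; simp only [pvScan, List.any_cons, List.any_nil]; split_ifs <;> simp_all
        · have hnone : pvRules.get? thought_type = none := by
            rw [PySem.Dict.get?_eq_none_iff_not_mem_keys, pvRules_keys]
            simp [h1, h2, h3, h4]
          rw [hnone]; simp [h1, h2, h3, h4]
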